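-- pv_equiv track=rewrite | github.com/ChMarinak/ann-for-protein-homology | neural_partition_ann/src/graph_utils.py | symmetrize_graph
-- ===== SOURCE A (Python) =====
-- from typing import List, Tuple, Dict
--
-- def symmetrize_graph(knn: Dict[int, List[int]]) -> Dict[int, Dict[int, int]]:
--     """
--     Convert directed neighbor lists into a symmetrized graph with weights:
--     weight = 2 if mutual, 1 otherwise
--     """
--     graph = {}
--     for node, neighbors in knn.items():
--         graph.setdefault(node, {})
--         for nbr in neighbors:
--             if nbr not in graph:
--                 graph[nbr] = {}
--             # check if mutual
--             if node in knn.get(nbr, []):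
--                 graph[node][nbr] = 2
--                 graph[nbr][node] = 2
--             else:
--                 # only set if not already set to 2
--                 if graph[node].get(nbr, 0) < 2:
--                     graph[node][nbr] = 1
--                 if graph[nbr].get(node, 0) < 2:
--                     graph[nbr][node] = 1
--     return graph
-- ===== SOURCE B (Python) =====
-- def symmetrize_graph(knn):
--     """
--     Build-table-then-expand: one pass over the directed edges collects
--     (a) node first-appearance order and (b) a weight per unordered pair
--     (2 if mutual, 1 otherwise); a second pass expands the table into the
--     symmetric adjacency dicts.
--     """
--     nbr_sets = {u: set(vs) for u, vs in knn.items()}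
--     order = []          # node first-appearance order (knn keys interleaved with new neighbors)
--     seen = set()
--     edges = {}          # unordered pair (min-first tuple) -> weight, in first-occurrence order
--     for u, vs in knn.items():
--         if u not in seen:
--             seen.add(u)
--             order.append(u)
--         for v in vs:
--             if v not in seen:
--                 seen.add(v)
--                 order.append(v)
--             key = (u, v) if u <= v else (v, u)
--             if key not in edges:
--                 edges[key] = 2 if u in nbr_sets.get(v, set()) else 1
--     graph = {x: {} for x in order}
--     for (a, b), w in edges.items():
--         graph[a][b] = w
--         graph[b][a] = w
--     return graph
-- ===== Notes on version B (the rewrite author's own statement) =====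
-- stated objective: alternative
-- what changed: Replaces A's incremental mutual-check-and-overwrite loop on nested dicts with a two-pass build-table-then-expand shape: pass one records node first-appearance order and one weight per unordered pair (mutuality tested against precomputed neighbor sets), pass two expands that table into the symmetric graph.
import Mathlib
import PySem

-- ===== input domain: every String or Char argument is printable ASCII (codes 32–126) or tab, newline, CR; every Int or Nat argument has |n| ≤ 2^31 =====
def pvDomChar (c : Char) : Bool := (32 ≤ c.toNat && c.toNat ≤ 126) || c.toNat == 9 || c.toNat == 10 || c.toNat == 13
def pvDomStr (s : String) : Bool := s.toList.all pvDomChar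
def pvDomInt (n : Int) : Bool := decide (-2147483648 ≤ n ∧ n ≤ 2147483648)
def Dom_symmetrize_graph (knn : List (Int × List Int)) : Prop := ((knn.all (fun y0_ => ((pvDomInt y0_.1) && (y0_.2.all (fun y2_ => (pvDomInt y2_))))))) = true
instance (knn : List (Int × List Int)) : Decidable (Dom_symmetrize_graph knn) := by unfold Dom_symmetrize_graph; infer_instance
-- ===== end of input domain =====

-- B replaces A's incremental mutual-check-and-overwrite loop with a two-pass
-- build-table-then-expand decomposition (same cost class; objective: alternative).

-- ===== PORT A =====
-- inner loop body of A: one directed edge (node, nbr)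
def pvAInner (knnD : PySem.Dict Int (List Int)) (node : Int)
    (graph : PySem.Dict Int (PySem.Dict Int Int)) (nbr : Int) :
    PySem.Dict Int (PySem.Dict Int Int) :=
  let graph := if graph.contains nbr then graph else graph.insert nbr PySem.Dict.empty
  if (knnD.getD nbr []).contains node then
    let graph := graph.modify node PySem.Dict.empty (fun m => m.insert nbr 2)
    graph.modify nbr PySem.Dict.empty (fun m => m.insert node 2)
  else
    let graph := if (graph.getD node PySem.Dict.empty).getD nbr 0 < 2 then
        graph.modify node PySem.Dict.empty (fun m => m.insert nbr 1) else graph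
    if (graph.getD nbr PySem.Dict.empty).getD node 0 < 2 then
      graph.modify nbr PySem.Dict.empty (fun m => m.insert node 1) else graph

def symmetrize_graph (knn : List (Int × List Int)) : List (Int × List (Int × Int)) :=
  let knnD := PySem.Dict.ofList knn
  let graph := knnD.items.foldl
    (fun graph p => p.2.foldl (pvAInner knnD p.1) (graph.setdefault p.1 PySem.Dict.empty))
    PySem.Dict.empty
  graph.items.map (fun q => (q.1, q.2.items))

-- ===== PORT B =====
-- unordered pair as a min-first tuple: `key = (u, v) if u <= v else (v, u)`
def pvNorm (u v : Int) : Int × Int := if u ≤ v then (u, v) else (v, u)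

-- pass-1 inner loop body of B: touch v, record the pair's weight at first occurrence
def pvBInner (nbrSets : PySem.Dict Int (List Int)) (u : Int)
    (st : PySem.Set Int × PySem.Dict (Int × Int) Int) (v : Int) :
    PySem.Set Int × PySem.Dict (Int × Int) Int :=
  let order := PySem.Set.add st.1 v
  if st.2.contains (pvNorm u v) then (order, st.2)
  else (order, st.2.insert (pvNorm u v)
        (if (nbrSets.getD v []).contains u then 2 else 1))

-- `graph = {x: {} for x in order}`
def pvSeed (order : List Int) : PySem.Dict Int (PySem.Dict Int Int) :=
  order.foldl (fun g x => g.insert x PySem.Dict.empty) PySem.Dict.empty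

-- pass-2 loop body of B: `graph[a][b] = w; graph[b][a] = w`
def pvStep (g : PySem.Dict Int (PySem.Dict Int Int)) (e : (Int × Int) × Int) :
    PySem.Dict Int (PySem.Dict Int Int) :=
  (g.modify e.1.1 PySem.Dict.empty (fun m => m.insert e.1.2 e.2)).modify e.1.2
    PySem.Dict.empty (fun m => m.insert e.1.1 e.2)

-- pass 2 of B: expand the edge table over the seeded node order
def pvExpand (order : List Int) (edges : PySem.Dict (Int × Int) Int) :
    PySem.Dict Int (PySem.Dict Int Int) :=
  edges.items.foldl pvStep (pvSeed order)

def symmetrize_graph_alt (knn : List (Int × List Int)) : List (Int × List (Int × Int)) :=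
  let knnD := PySem.Dict.ofList knn
  let nbrSets := knnD.items.foldl
    (fun d p => d.insert p.1 (PySem.Set.ofList p.2)) PySem.Dict.empty
  let st := knnD.items.foldl
    (fun st p => p.2.foldl (pvBInner nbrSets p.1) (PySem.Set.add st.1 p.1, st.2))
    (([], PySem.Dict.empty) : PySem.Set Int × PySem.Dict (Int × Int) Int)
  (pvExpand st.1 st.2).items.map (fun q => (q.1, q.2.items))

-- ===== PRECONDITION & SPEC =====
def Spec_symmetrize_graph (knn : List (Int × List Int)) (out : List (Int × List (Int × Int))) : Prop := out = symmetrize_graph_alt knn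
instance (knn : List (Int × List Int)) (out : List (Int × List (Int × Int))) : Decidable (Spec_symmetrize_graph knn out) := by unfold Spec_symmetrize_graph; infer_instance

-- ===== CLAIM (what is proved, stated in full; the proofs are below) =====
def Claim_equal_symmetrize_graph : Prop := ∀ (knn : List (Int × List Int)), Dom_symmetrize_graph knn → Spec_symmetrize_graph knn (symmetrize_graph knn)

-- ===== LEMMAS AND PROOFS =====

-- the weight A ends up storing for the unordered pair {a, b} (symmetric in a, b)
def pvW (knnD : PySem.Dict Int (List Int)) (a b : Int) : Int :=
  if (knnD.getD b []).contains a && (knnD.getD a []).contains b then 2 else 1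

-- invariant tying B's pass-1 state to the knn dict
structure PvInv (knnD : PySem.Dict Int (List Int)) (order : List Int)
    (edges : PySem.Dict (Int × Int) Int) : Prop where
  nodupO : order.Nodup
  nodupE : edges.keys.Nodup
  ends : ∀ e ∈ edges.items, e.1.1 ∈ order ∧ e.1.2 ∈ order ∧
    pvNorm e.1.1 e.1.2 = e.1 ∧ e.2 = pvW knnD e.1.1 e.1.2

theorem pvNorm_comm (u v : Int) : pvNorm u v = pvNorm v u := by
  unfold pvNorm; split_ifs <;> simp_all [Prod.ext_iff] <;> omega

theorem pvNorm_cases (u v : Int) : pvNorm u v = (u, v) ∨ pvNorm u v = (v, u) := by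
  unfold pvNorm; split_ifs <;> simp

theorem pvNorm_norm (u v : Int) : pvNorm (pvNorm u v).1 (pvNorm u v).2 = pvNorm u v := by
  unfold pvNorm; split_ifs <;> simp_all <;> omega

theorem pvNorm_eq_iff (a b u v : Int) (hab : pvNorm a b = (a, b)) :
    pvNorm u v = (a, b) ↔ (u = a ∧ v = b) ∨ (u = b ∧ v = a) := by
  constructor
  · intro h
    rcases pvNorm_cases u v with hc | hc <;> rw [hc] at h <;>
      simp only [Prod.mk.injEq] at h <;> tauto
  · rintro (⟨rfl, rfl⟩ | ⟨rfl, rfl⟩)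
    · exact hab
    · rw [pvNorm_comm]; exact hab

theorem pvW_comm (knnD : PySem.Dict Int (List Int)) (a b : Int) :
    pvW knnD a b = pvW knnD b a := by
  unfold pvW; rw [Bool.and_comm]

-- a no-op insert: re-inserting the value already stored leaves the dict unchanged
theorem pv_get?_of_mem_keys {κ ν : Type} [BEq κ] [LawfulBEq κ] (d : PySem.Dict κ ν)
    (k : κ) (dflt : ν) (hk : k ∈ d.keys) : d.get? k = some (d.getD k dflt) := by
  cases h : d.get? k with
  | none => exact absurd hk ((PySem.Dict.get?_eq_none_iff_not_mem_keys d k).mp h)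
  | some r => simp [PySem.Dict.getD, h]

theorem pv_insert_noop {κ ν : Type} [BEq κ] [LawfulBEq κ] (d : PySem.Dict κ ν)
    (k : κ) (v : ν) (hnd : d.keys.Nodup) (h : d.get? k = some v) : d.insert k v = d := by
  have hc : d.contains k = true := by
    rw [PySem.Dict.contains_iff_mem_keys]
    by_contra hmem
    have h0 := (PySem.Dict.get?_eq_none_iff_not_mem_keys d k).mpr hmem
    rw [h] at h0; cases h0
  apply PySem.Dict.ext
  rw [PySem.Dict.items_insert_of_contains d v hc]
  have hcong : ∀ p ∈ d.items, (if (p.1 == k) = true then (k, v) else p) = p := by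
    intro p hp
    obtain ⟨pk, pw⟩ := p
    by_cases hpk : pk = k
    · subst hpk
      have hg : d.get? pk = some pw := PySem.Dict.get?_of_mem_items _ hp hnd
      rw [h] at hg
      injection hg with hv
      simp [hv]
    · simp [hpk]
  rw [List.map_congr_left hcong]
  simp

-- two modifies at distinct existing keys commute
theorem pv_insert_comm_contained {κ ν : Type} [BEq κ] [LawfulBEq κ] (g : PySem.Dict κ ν)
    (u v : κ) (a b : ν) (hu : g.contains u = true) (hv : g.contains v = true)
    (huv : u ≠ v) : (g.insert u a).insert v b = (g.insert v b).insert u a := by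
  apply PySem.Dict.ext
  have hu' : (g.insert v b).contains u = true := by
    rw [PySem.Dict.contains_insert]; simp [hu]
  have hv' : (g.insert u a).contains v = true := by
    rw [PySem.Dict.contains_insert]; simp [hv]
  rw [PySem.Dict.items_insert_of_contains _ b hv', PySem.Dict.items_insert_of_contains _ a hu,
      PySem.Dict.items_insert_of_contains _ a hu', PySem.Dict.items_insert_of_contains _ b hv,
      List.map_map, List.map_map]
  apply List.map_congr_left
  intro p _
  obtain ⟨pk, pw⟩ := p
  by_cases h1 : pk = u <;> by_cases h2 : pk = v <;>
    simp_all [Function.comp, Ne.symm huv]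

theorem pv_modify_comm {κ ν : Type} [BEq κ] [LawfulBEq κ] (g : PySem.Dict κ ν)
    (u v : κ) (d0 d1 : ν) (f h : ν → ν) (hu : g.contains u = true)
    (hv : g.contains v = true) (huv : u ≠ v) :
    (g.modify u d0 f).modify v d1 h = (g.modify v d1 h).modify u d0 f := by
  simp only [PySem.Dict.modify]
  have h1 : (g.insert u (f (g.getD u d0))).getD v d1 = g.getD v d1 := by
    simp [PySem.Dict.getD, PySem.Dict.get?_insert_of_ne _ _ (Ne.symm huv)]
  have h2 : (g.insert v (h (g.getD v d1))).getD u d0 = g.getD u d0 := by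
    simp [PySem.Dict.getD, PySem.Dict.get?_insert_of_ne _ _ huv]
  rw [h1, h2]
  exact pv_insert_comm_contained g u v _ _ hu hv huv

-- inserting a fresh key commutes with an insert at a distinct existing key
theorem pv_insert_fresh_comm {κ ν : Type} [BEq κ] [LawfulBEq κ] (g : PySem.Dict κ ν)
    (x k : κ) (w v : ν) (hk : g.contains k = true) (hx : g.contains x = false)
    (hxk : x ≠ k) : (g.insert x w).insert k v = (g.insert k v).insert x w := by
  apply PySem.Dict.ext
  have hxc : (g.insert k v).contains x = false := by
    rw [PySem.Dict.contains_insert]; simp [hx, hxk]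
  have hkc : (g.insert x w).contains k = true := by
    rw [PySem.Dict.contains_insert]; simp [hk]
  rw [PySem.Dict.items_insert_of_contains _ v hkc, PySem.Dict.items_insert_of_not_contains _ w hx,
      PySem.Dict.items_insert_of_not_contains _ w hxc, PySem.Dict.items_insert_of_contains _ v hk,
      List.map_append]
  simp [hxk]

theorem pv_modify_insert_fresh_comm {κ ν : Type} [BEq κ] [LawfulBEq κ]
    (g : PySem.Dict κ ν) (x k : κ) (w d0 : ν) (f : ν → ν) (hk : g.contains k = true)
    (hx : g.contains x = false) (hxk : x ≠ k) :
    (g.insert x w).modify k d0 f = (g.modify k d0 f).insert x w := by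
  simp only [PySem.Dict.modify]
  have h1 : (g.insert x w).getD k d0 = g.getD k d0 := by
    simp [PySem.Dict.getD, PySem.Dict.get?_insert_of_ne _ _ (Ne.symm hxk)]
  rw [h1]
  exact pv_insert_fresh_comm g x k w _ hk hx hxk

-- seed facts
theorem pvSeed_get?_gen (order : List Int) (d : PySem.Dict Int (PySem.Dict Int Int)) (u : Int) :
    (order.foldl (fun g x => g.insert x PySem.Dict.empty) d).get? u
      = if u ∈ order then some PySem.Dict.empty else d.get? u := by
  induction order generalizing d with
  | nil => simp
  | cons y ys ih =>
    simp only [List.foldl_cons]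
    rw [ih]
    by_cases hy : u ∈ ys
    · simp [hy, List.mem_cons]
    · simp only [hy, if_false]
      rw [PySem.Dict.get?_insert]
      by_cases hu : u = y <;> simp [hu, hy, List.mem_cons]

theorem pvSeed_getD (order : List Int) (u : Int) :
    (pvSeed order).getD u PySem.Dict.empty = PySem.Dict.empty := by
  simp only [pvSeed, PySem.Dict.getD]
  rw [pvSeed_get?_gen]
  split_ifs <;> simp [PySem.Dict.get?_empty]

theorem pvSeed_keys (order : List Int) (h : order.Nodup) : (pvSeed order).keys = order := by
  unfold pvSeed
  rw [PySem.Dict.keys_foldl_insert (f := fun _ _ => PySem.Dict.empty),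
      show (PySem.Dict.empty : PySem.Dict Int (PySem.Dict Int Int)).keys = [] from rfl]
  have h2 := PySem.Set.update_eq_append_of_disjoint (s := ([] : PySem.Set Int)) (xs := order)
    h (by simp)
  simpa using h2

theorem pvSeed_append (order : List Int) (x : Int) :
    pvSeed (order ++ [x]) = (pvSeed order).insert x PySem.Dict.empty := by
  simp [pvSeed, List.foldl_append]

-- pvStep facts
theorem pvStep_keys (g : PySem.Dict Int (PySem.Dict Int Int)) (e : (Int × Int) × Int)
    (ha : e.1.1 ∈ g.keys) (hb : e.1.2 ∈ g.keys) : (pvStep g e).keys = g.keys := by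
  have ha' : g.contains e.1.1 = true := (PySem.Dict.contains_iff_mem_keys _ _).mpr ha
  have k1 : (g.modify e.1.1 PySem.Dict.empty (fun m => m.insert e.1.2 e.2)).keys = g.keys := by
    rw [PySem.Dict.keys_modify, PySem.Dict.keys_insert_of_contains _ _ ha']
  have hb' : (g.modify e.1.1 PySem.Dict.empty (fun m => m.insert e.1.2 e.2)).contains e.1.2 = true := by
    rw [PySem.Dict.contains_iff_mem_keys, k1]; exact hb
  simp only [pvStep]
  rw [PySem.Dict.keys_modify, PySem.Dict.keys_insert_of_contains _ _ hb', k1]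

theorem pvStep_row_get (g : PySem.Dict Int (PySem.Dict Int Int)) (a b : Int) (w : Int)
    (hab : pvNorm a b = (a, b)) (u v : Int) :
    ((pvStep g ((a, b), w)).getD u PySem.Dict.empty).get? v
      = if pvNorm u v = (a, b) then some w
        else ((g.getD u PySem.Dict.empty).get? v) := by
  simp only [pvNorm_eq_iff a b u v hab]
  by_cases h1 : u = b <;> by_cases h2 : u = a <;>
    by_cases h3 : v = a <;> by_cases h4 : v = b <;>
      simp_all [pvStep, PySem.Dict.getD_modify, PySem.Dict.get?_insert,
        PySem.Dict.insert_insert_self]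

theorem pvStep_row_nodup (g : PySem.Dict Int (PySem.Dict Int Int)) (e : (Int × Int) × Int)
    (h : ∀ u, ((g.getD u PySem.Dict.empty).keys.Nodup)) :
    ∀ u, (((pvStep g e).getD u PySem.Dict.empty).keys.Nodup) := by
  intro u
  obtain ⟨⟨a, b⟩, w⟩ := e
  simp only [pvStep, PySem.Dict.getD_modify]
  split_ifs <;>
    (repeat' first
      | apply PySem.Dict.nodup_keys_insert
      | exact h _)

-- fold-level facts about pass 2
theorem pv_foldl_keys (es : List ((Int × Int) × Int)) (g : PySem.Dict Int (PySem.Dict Int Int))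
    (hends : ∀ e ∈ es, e.1.1 ∈ g.keys ∧ e.1.2 ∈ g.keys) :
    (es.foldl pvStep g).keys = g.keys := by
  induction es generalizing g with
  | nil => rfl
  | cons e es ih =>
    have hk := pvStep_keys g e (hends e (by simp)).1 (hends e (by simp)).2
    simp only [List.foldl_cons]
    rw [ih (pvStep g e) ?_, hk]
    intro e' he'; rw [hk]; exact hends e' (by simp [he'])

theorem pv_foldl_row_get (es : List ((Int × Int) × Int))
    (hk : (es.map (fun e => e.1)).Nodup)
    (hnorm : ∀ e ∈ es, pvNorm e.1.1 e.1.2 = e.1)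
    (g : PySem.Dict Int (PySem.Dict Int Int)) (u v : Int) :
    ((es.foldl pvStep g).getD u PySem.Dict.empty).get? v
      = ((es.find? (fun e => e.1 == pvNorm u v)).map (fun e => e.2)).or
          ((g.getD u PySem.Dict.empty).get? v) := by
  induction es generalizing g with
  | nil => simp
  | cons e es ih =>
    obtain ⟨⟨a, b⟩, w⟩ := e
    have hnab : pvNorm a b = (a, b) := hnorm ((a, b), w) (by simp)
    simp only [List.foldl_cons]
    rw [ih (by simpa using (List.nodup_cons.mp hk).2)
        (fun e' he' => hnorm e' (by simp [he'])) (pvStep g ((a, b), w)),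
      pvStep_row_get g a b w hnab u v]
    by_cases hmatch : pvNorm u v = (a, b)
    · have hpred : ((((a, b), w) : (Int × Int) × Int).1 == pvNorm u v) = true := by
        simp [hmatch]
      have hnone : es.find? (fun e => e.1 == pvNorm u v) = none := by
        rw [List.find?_eq_none]
        intro x hx hbeq
        have hx1 : x.1 = pvNorm u v := by simpa using hbeq
        have : ((a, b) : Int × Int) ∈ es.map (fun e => e.1) :=
          hmatch ▸ hx1 ▸ List.mem_map_of_mem hx
        exact absurd this (by simpa using (List.nodup_cons.mp hk).1)
      rw [List.find?_cons_of_pos (p := fun e => e.1 == pvNorm u v) (l := es) hpred, hnone, hmatch]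
      simp
    · have hpred : ((((a, b), w) : (Int × Int) × Int).1 == pvNorm u v) = false := by
        simp; intro h; exact absurd h.symm hmatch
      rw [List.find?_cons_of_neg (p := fun e => e.1 == pvNorm u v) (l := es) (by simp [hpred]), if_neg hmatch]

theorem pv_foldl_row_nodup (es : List ((Int × Int) × Int))
    (g : PySem.Dict Int (PySem.Dict Int Int))
    (h : ∀ u, ((g.getD u PySem.Dict.empty).keys.Nodup)) :
    ∀ u, (((es.foldl pvStep g).getD u PySem.Dict.empty).keys.Nodup) := by
  induction es generalizing g with
  | nil => exact h
  | cons e es ih =>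
    simp only [List.foldl_cons]
    exact ih (pvStep g e) (pvStep_row_nodup g e h)

theorem pv_foldl_insert_fresh (es : List ((Int × Int) × Int))
    (g : PySem.Dict Int (PySem.Dict Int Int)) (x : Int)
    (hx : g.contains x = false)
    (hends : ∀ e ∈ es, e.1.1 ∈ g.keys ∧ e.1.2 ∈ g.keys)
    (hxe : ∀ e ∈ es, x ≠ e.1.1 ∧ x ≠ e.1.2) :
    es.foldl pvStep (g.insert x PySem.Dict.empty)
      = (es.foldl pvStep g).insert x PySem.Dict.empty := by
  induction es generalizing g with
  | nil => rfl
  | cons e es ih =>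
    have ha : g.contains e.1.1 = true :=
      (PySem.Dict.contains_iff_mem_keys _ _).mpr (hends e (by simp)).1
    have hb' : (g.modify e.1.1 PySem.Dict.empty (fun m => m.insert e.1.2 e.2)).contains e.1.2 = true := by
      rw [PySem.Dict.contains_iff_mem_keys, PySem.Dict.keys_modify,
        PySem.Dict.keys_insert_of_contains _ _ ha]
      exact (hends e (by simp)).2
    have hx1 : (g.modify e.1.1 PySem.Dict.empty (fun m => m.insert e.1.2 e.2)).contains x = false := by
      rw [PySem.Dict.contains_eq_decide_mem_keys, PySem.Dict.keys_modify,
        PySem.Dict.keys_insert_of_contains _ _ ha]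
      rw [PySem.Dict.contains_eq_decide_mem_keys] at hx
      simpa using hx
    have step : pvStep (g.insert x PySem.Dict.empty) e = (pvStep g e).insert x PySem.Dict.empty := by
      simp only [pvStep]
      rw [pv_modify_insert_fresh_comm g x e.1.1 _ _ _ ha hx (hxe e (by simp)).1,
        pv_modify_insert_fresh_comm _ x e.1.2 _ _ _ hb' hx1 (hxe e (by simp)).2]
    simp only [List.foldl_cons]
    rw [step]
    have hkeys := pvStep_keys g e (hends e (by simp)).1 (hends e (by simp)).2
    refine ih (pvStep g e) ?_ ?_ ?_
    · rw [PySem.Dict.contains_eq_decide_mem_keys, hkeys,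
        ← PySem.Dict.contains_eq_decide_mem_keys]
      exact hx
    · intro e' he'; rw [hkeys]; exact hends e' (by simp [he'])
    · intro e' he'; exact hxe e' (by simp [he'])

-- derived facts about pvExpand under the invariant
theorem pvExpand_keys (knnD : PySem.Dict Int (List Int)) (order : List Int)
    (edges : PySem.Dict (Int × Int) Int) (inv : PvInv knnD order edges) :
    (pvExpand order edges).keys = order := by
  unfold pvExpand
  rw [pv_foldl_keys _ _ ?_, pvSeed_keys order inv.nodupO]
  intro e he
  rw [pvSeed_keys order inv.nodupO]
  exact ⟨(inv.ends e he).1, (inv.ends e he).2.1⟩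

theorem pvExpand_row_get (knnD : PySem.Dict Int (List Int)) (order : List Int)
    (edges : PySem.Dict (Int × Int) Int) (inv : PvInv knnD order edges) (u v : Int) :
    ((pvExpand order edges).getD u PySem.Dict.empty).get? v = edges.get? (pvNorm u v) := by
  unfold pvExpand
  rw [pv_foldl_row_get edges.items inv.nodupE (fun e he => (inv.ends e he).2.2.1)
      (pvSeed order) u v, pvSeed_getD, PySem.Dict.get?_empty, Option.or_none]
  rfl

theorem pvExpand_row_nodup (order : List Int) (edges : PySem.Dict (Int × Int) Int) :
    ∀ u, (((pvExpand order edges).getD u PySem.Dict.empty).keys.Nodup) := by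
  apply pv_foldl_row_nodup
  intro u
  rw [pvSeed_getD]
  exact List.nodup_nil

theorem pvExpand_insert_fresh (knnD : PySem.Dict Int (List Int)) (order : List Int)
    (edges : PySem.Dict (Int × Int) Int) (inv : PvInv knnD order edges) (x : Int)
    (hx : x ∉ order) :
    pvExpand (order ++ [x]) edges = (pvExpand order edges).insert x PySem.Dict.empty := by
  unfold pvExpand
  rw [pvSeed_append]
  refine pv_foldl_insert_fresh edges.items (pvSeed order) x ?_ ?_ ?_
  · rw [PySem.Dict.contains_eq_decide_mem_keys, pvSeed_keys order inv.nodupO]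
    simp [hx]
  · intro e he
    rw [pvSeed_keys order inv.nodupO]
    exact ⟨(inv.ends e he).1, (inv.ends e he).2.1⟩
  · intro e he
    constructor
    · intro h; exact hx (h ▸ (inv.ends e he).1)
    · intro h; exact hx (h ▸ (inv.ends e he).2.1)

-- `graph.setdefault node {}` is `order.add node` on the expanded form
theorem pvExpand_setdefault (knnD : PySem.Dict Int (List Int)) (order : List Int)
    (edges : PySem.Dict (Int × Int) Int) (inv : PvInv knnD order edges) (x : Int) :
    (pvExpand order edges).setdefault x PySem.Dict.empty
      = pvExpand (PySem.Set.add order x) edges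
    ∧ PvInv knnD (PySem.Set.add order x) edges := by
  by_cases hc : x ∈ order
  · have hadd : PySem.Set.add order x = order := by simp [PySem.Set.add, hc]
    refine ⟨?_, by rw [hadd]; exact inv⟩
    rw [hadd]
    apply PySem.Dict.setdefault_of_contains
    rw [PySem.Dict.contains_iff_mem_keys, pvExpand_keys knnD order edges inv]
    exact hc
  · have hadd : PySem.Set.add order x = order ++ [x] := by simp [PySem.Set.add, hc]
    have hcf : (pvExpand order edges).contains x = false := by
      rw [PySem.Dict.contains_eq_decide_mem_keys, pvExpand_keys knnD order edges inv]
      simp [hc]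
    constructor
    · rw [PySem.Dict.setdefault_of_not_contains _ _ hcf, hadd,
        pvExpand_insert_fresh knnD order edges inv x hc]
    · rw [hadd]
      refine ⟨?_, inv.nodupE, ?_⟩
      · simp only [List.nodup_append]
        refine ⟨inv.nodupO, List.nodup_singleton _, ?_⟩
        intro a ha b hb
        simp only [List.mem_singleton] at hb
        subst hb
        intro h
        exact hc (h ▸ ha)
      · intro e he
        exact ⟨List.mem_append_left _ (inv.ends e he).1,
          List.mem_append_left _ (inv.ends e he).2.1, (inv.ends e he).2.2⟩

-- one directed edge: A's step equals B's step on expanded states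
theorem pv_step_sim (knnD nbrSets : PySem.Dict Int (List Int))
    (hN : ∀ u v : Int, (nbrSets.getD v []).contains u = (knnD.getD v []).contains u)
    (u v : Int) (order : List Int) (edges : PySem.Dict (Int × Int) Int)
    (inv : PvInv knnD order edges) (hu : u ∈ order)
    (hv : (knnD.getD u []).contains v = true) :
    pvAInner knnD u (pvExpand order edges) v
      = pvExpand (pvBInner nbrSets u (order, edges) v).1 (pvBInner nbrSets u (order, edges) v).2
    ∧ PvInv knnD (pvBInner nbrSets u (order, edges) v).1 (pvBInner nbrSets u (order, edges) v).2
    ∧ ∀ x ∈ order, x ∈ (pvBInner nbrSets u (order, edges) v).1 := by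
  have hkeys := pvExpand_keys knnD order edges inv
  have hrow := pvExpand_row_get knnD order edges inv
  have hrownd := pvExpand_row_nodup order edges
  have hGnd : (pvExpand order edges).keys.Nodup := by rw [hkeys]; exact inv.nodupO
  have hmodnoop : ∀ (x y wv : Int), x ∈ order →
      ((pvExpand order edges).getD x PySem.Dict.empty).get? y = some wv →
      (pvExpand order edges).modify x PySem.Dict.empty (fun m => m.insert y wv)
        = pvExpand order edges := by
    intro x y wv hx hval
    have hrow_eq : ((pvExpand order edges).getD x PySem.Dict.empty).insert y wv
        = (pvExpand order edges).getD x PySem.Dict.empty :=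
      pv_insert_noop _ _ _ (hrownd x) hval
    have hgux : (pvExpand order edges).get? x
        = some ((pvExpand order edges).getD x PySem.Dict.empty) :=
      pv_get?_of_mem_keys _ _ _ (by rw [hkeys]; exact hx)
    simp only [PySem.Dict.modify]
    rw [hrow_eq]
    exact pv_insert_noop _ _ _ hGnd hgux
  by_cases hE : edges.contains (pvNorm u v) = true
  · -- the pair was already recorded: both sides leave their state unchanged
    obtain ⟨e, he, hek⟩ : ∃ e ∈ edges.items, e.1 = pvNorm u v := by
      have hmem : pvNorm u v ∈ edges.keys := (PySem.Dict.contains_iff_mem_keys _ _).mp hE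
      have hmem' : pvNorm u v ∈ edges.items.map (fun x => x.1) := hmem
      obtain ⟨e, he, hk'⟩ := List.mem_map.mp hmem'
      exact ⟨e, he, hk'⟩
    have hends := inv.ends e he
    have hvord : v ∈ order := by
      rcases pvNorm_cases u v with hc | hc
      · have h2 : e.1.2 = v := by rw [hek, hc]
        exact h2 ▸ hends.2.1
      · have h2 : e.1.1 = v := by rw [hek, hc]
        exact h2 ▸ hends.1
    have hw : edges.get? (pvNorm u v) = some (pvW knnD u v) := by
      have hg : edges.get? e.1 = some e.2 := by
        have he' : (e.1, e.2) ∈ edges.items := by simpa using he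
        exact PySem.Dict.get?_of_mem_items _ he' inv.nodupE
      rw [hek] at hg
      rw [hg, hends.2.2.2]
      rcases pvNorm_cases u v with hc | hc
      · rw [hek, hc]
      · rw [hek, hc]
        exact congrArg some (pvW_comm knnD v u)
    have hBadd : PySem.Set.add order v = order := by simp [PySem.Set.add, hvord]
    have hB : pvBInner nbrSets u (order, edges) v = (order, edges) := by
      simp [pvBInner, hE, hBadd]
    rw [hB]
    refine ⟨?_, inv, fun x hx => hx⟩
    have hcontv : (pvExpand order edges).contains v = true := by
      rw [PySem.Dict.contains_iff_mem_keys, hkeys]; exact hvord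
    have hv' : v ∈ knnD.getD u [] := by simpa using hv
    simp only [pvAInner]
    rw [if_pos hcontv]
    by_cases hm : (knnD.getD v []).contains u = true
    · have hm' : u ∈ knnD.getD v [] := by simpa using hm
      have hw2 : pvW knnD u v = 2 := by simp [pvW, hm', hv']
      have hn1 := hmodnoop u v 2 hu (by rw [hrow u v, hw, hw2])
      have hn2 := hmodnoop v u 2 hvord (by rw [hrow v u, pvNorm_comm v u, hw, hw2])
      rw [if_pos hm, hn1, hn2]
    · have hm' : u ∉ knnD.getD v [] := by simpa using hm
      have hw1 : pvW knnD u v = 1 := by simp [pvW, hm']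
      have hval1 : ((pvExpand order edges).getD u PySem.Dict.empty).getD v 0 = 1 := by
        rw [PySem.Dict.getD_eq_get?_getD, hrow u v, hw, hw1]
        rfl
      have hval2 : ((pvExpand order edges).getD v PySem.Dict.empty).getD u 0 = 1 := by
        rw [PySem.Dict.getD_eq_get?_getD, hrow v u, pvNorm_comm v u, hw, hw1]
        rfl
      have hn1 := hmodnoop u v 1 hu (by rw [hrow u v, hw, hw1])
      have hn2 := hmodnoop v u 1 hvord (by rw [hrow v u, pvNorm_comm v u, hw, hw1])
      have hstep1 : (if ((pvExpand order edges).getD u PySem.Dict.empty).getD v 0 < 2 then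
          (pvExpand order edges).modify u PySem.Dict.empty (fun m => m.insert v 1)
          else pvExpand order edges) = pvExpand order edges := by
        rw [if_pos (by rw [hval1]; norm_num), hn1]
      rw [if_neg hm, hstep1, if_pos (by rw [hval2]; norm_num), hn2]
  · -- a new pair: B appends it; A writes the same two cells
    have hEf : edges.contains (pvNorm u v) = false := by simpa using hE
    have hget_none : edges.get? (pvNorm u v) = none := by
      rw [PySem.Dict.get?_eq_none_iff_not_mem_keys]
      intro hmem; exact hE ((PySem.Dict.contains_iff_mem_keys _ _).mpr hmem)
    have hv' : v ∈ knnD.getD u [] := by simpa using hv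
    have hNm : ∀ a b : Int, (a ∈ nbrSets.getD b []) ↔ a ∈ knnD.getD b [] := by
      intro a b
      have h := hN a b
      constructor <;> intro hmem
      · have h2 : (knnD.getD b []).contains a = true := by rw [← h]; simpa using hmem
        simpa using h2
      · have h2 : (nbrSets.getD b []).contains a = true := by rw [h]; simpa using hmem
        simpa using h2
    have hwW : (if u ∈ knnD.getD v [] then (2 : Int) else 1) = pvW knnD u v := by
      simp [pvW, hv']
    have hB : pvBInner nbrSets u (order, edges) v
        = (PySem.Set.add order v, edges.insert (pvNorm u v) (pvW knnD u v)) := by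
      simp [pvBInner, hEf, hNm u v, hwW]
    rw [hB]
    have horder2 : ∀ x ∈ order, x ∈ PySem.Set.add order v :=
      fun x hx => (PySem.Set.mem_add _ _ _).mpr (Or.inl hx)
    have hvord2 : v ∈ PySem.Set.add order v := (PySem.Set.mem_add _ _ _).mpr (Or.inr rfl)
    have hnd2 : (PySem.Set.add order v).Nodup := by
      by_cases hvo : v ∈ order
      · simpa [PySem.Set.add, hvo] using inv.nodupO
      · rw [show PySem.Set.add order v = order ++ [v] from by simp [PySem.Set.add, hvo]]
        simp only [List.nodup_append]
        refine ⟨inv.nodupO, List.nodup_singleton _, ?_⟩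
        intro a ha b hb
        simp only [List.mem_singleton] at hb
        subst hb
        intro h
        exact hvo (h ▸ ha)
    have inv2 : PvInv knnD (PySem.Set.add order v) edges :=
      ⟨hnd2, inv.nodupE, fun e he =>
        ⟨horder2 _ (inv.ends e he).1, horder2 _ (inv.ends e he).2.1, (inv.ends e he).2.2⟩⟩
    have hkeys2 := pvExpand_keys knnD _ _ inv2
    have hrow2 := pvExpand_row_get knnD _ _ inv2
    have hA1 : (if (pvExpand order edges).contains v then pvExpand order edges
        else (pvExpand order edges).insert v PySem.Dict.empty)
        = pvExpand (PySem.Set.add order v) edges := by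
      by_cases hvo : v ∈ order
      · have hcv : (pvExpand order edges).contains v = true := by
          rw [PySem.Dict.contains_iff_mem_keys, hkeys]; exact hvo
        rw [show PySem.Set.add order v = order from by simp [PySem.Set.add, hvo]]
        simp [hcv]
      · have hcv : (pvExpand order edges).contains v = false := by
          rw [PySem.Dict.contains_eq_decide_mem_keys, hkeys]; simp [hvo]
        rw [show PySem.Set.add order v = order ++ [v] from by simp [PySem.Set.add, hvo]]
        simp [hcv, pvExpand_insert_fresh knnD order edges inv v hvo]
    have hexp : pvExpand (PySem.Set.add order v) (edges.insert (pvNorm u v) (pvW knnD u v))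
        = pvStep (pvExpand (PySem.Set.add order v) edges) (pvNorm u v, pvW knnD u v) := by
      unfold pvExpand
      rw [PySem.Dict.items_insert_of_not_contains _ _ hEf, List.foldl_append]
      simp only [List.foldl_cons, List.foldl_nil]
    have invF : PvInv knnD (PySem.Set.add order v) (edges.insert (pvNorm u v) (pvW knnD u v)) := by
      refine ⟨hnd2, PySem.Dict.nodup_keys_insert _ _ _ inv.nodupE, ?_⟩
      intro e he
      rw [PySem.Dict.items_insert_of_not_contains _ _ hEf] at he
      rcases List.mem_append.mp he with he' | he'
      · exact ⟨horder2 _ (inv.ends e he').1, horder2 _ (inv.ends e he').2.1, (inv.ends e he').2.2⟩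
      · rcases List.mem_singleton.mp he' with rfl
        have h1 : (pvNorm u v).1 ∈ PySem.Set.add order v := by
          rcases pvNorm_cases u v with hc | hc <;> rw [hc]
          · exact horder2 u hu
          · exact hvord2
        have h2 : (pvNorm u v).2 ∈ PySem.Set.add order v := by
          rcases pvNorm_cases u v with hc | hc <;> rw [hc]
          · exact hvord2
          · exact horder2 u hu
        have h4 : pvW knnD u v = pvW knnD (pvNorm u v).1 (pvNorm u v).2 := by
          rcases pvNorm_cases u v with hc | hc <;> rw [hc] <;>
            first
              | rfl
              | exact pvW_comm knnD u v
        exact ⟨h1, h2, pvNorm_norm u v, h4⟩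
    refine ⟨?_, invF, horder2⟩
    rw [hexp]
    have hcu2 : (pvExpand (PySem.Set.add order v) edges).contains u = true := by
      rw [PySem.Dict.contains_iff_mem_keys, hkeys2]; exact horder2 u hu
    have hcv2 : (pvExpand (PySem.Set.add order v) edges).contains v = true := by
      rw [PySem.Dict.contains_iff_mem_keys, hkeys2]; exact hvord2
    simp only [pvAInner]
    rw [hA1]
    by_cases hm : (knnD.getD v []).contains u = true
    · have hm' : u ∈ knnD.getD v [] := by simpa using hm
      have hw2 : pvW knnD u v = 2 := by simp [pvW, hm', hv']
      rw [hw2, if_pos hm]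
      by_cases huv : u = v
      · subst huv
        rw [show pvNorm u u = (u, u) from by simp [pvNorm]]
        rfl
      · rcases pvNorm_cases u v with hc | hc <;> rw [hc] <;> simp only [pvStep] <;>
          first
            | rfl
            | exact pv_modify_comm _ u v _ _ _ _ hcu2 hcv2 huv
    · have hm' : u ∉ knnD.getD v [] := by simpa using hm
      have hw1 : pvW knnD u v = 1 := by simp [pvW, hm']
      have huv : u ≠ v := by
        intro h; subst h; exact hm hv
      have hrval1 : ((pvExpand (PySem.Set.add order v) edges).getD u PySem.Dict.empty).getD v 0 = 0 := by
        rw [PySem.Dict.getD_eq_get?_getD, hrow2 u v, hget_none]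
        rfl
      have hrval2 : (((pvExpand (PySem.Set.add order v) edges).modify u PySem.Dict.empty
          (fun m => m.insert v 1)).getD v PySem.Dict.empty).getD u 0 = 0 := by
        rw [PySem.Dict.getD_modify, if_neg (Ne.symm huv),
          PySem.Dict.getD_eq_get?_getD, hrow2 v u, pvNorm_comm v u, hget_none]
        rfl
      have hstep1 : (if ((pvExpand (PySem.Set.add order v) edges).getD u PySem.Dict.empty).getD v 0 < 2 then
          (pvExpand (PySem.Set.add order v) edges).modify u PySem.Dict.empty (fun m => m.insert v 1)
          else pvExpand (PySem.Set.add order v) edges)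
          = (pvExpand (PySem.Set.add order v) edges).modify u PySem.Dict.empty (fun m => m.insert v 1) := by
        rw [if_pos (by rw [hrval1]; norm_num)]
      rw [hw1, if_neg hm, hstep1, if_pos (by rw [hrval2]; norm_num)]
      rcases pvNorm_cases u v with hc | hc <;> rw [hc] <;> simp only [pvStep] <;>
        first
          | rfl
          | exact pv_modify_comm _ u v _ _ _ _ hcu2 hcv2 huv

theorem pv_inner_sim (knnD nbrSets : PySem.Dict Int (List Int))
    (hN : ∀ u v : Int, (nbrSets.getD v []).contains u = (knnD.getD v []).contains u)
    (u : Int) (nbrs : List Int) (order : List Int) (edges : PySem.Dict (Int × Int) Int)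
    (inv : PvInv knnD order edges) (hu : u ∈ order)
    (hnb : ∀ x ∈ nbrs, (knnD.getD u []).contains x = true) :
    nbrs.foldl (pvAInner knnD u) (pvExpand order edges)
      = pvExpand (nbrs.foldl (pvBInner nbrSets u) (order, edges)).1
          (nbrs.foldl (pvBInner nbrSets u) (order, edges)).2
    ∧ PvInv knnD (nbrs.foldl (pvBInner nbrSets u) (order, edges)).1
        (nbrs.foldl (pvBInner nbrSets u) (order, edges)).2
    ∧ ∀ x ∈ order, x ∈ (nbrs.foldl (pvBInner nbrSets u) (order, edges)).1 := by
  induction nbrs generalizing order edges with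
  | nil => exact ⟨rfl, inv, fun x hx => hx⟩
  | cons v vs ih =>
    obtain ⟨heq, inv1, hsub1⟩ := pv_step_sim knnD nbrSets hN u v order edges inv hu (hnb v (by simp))
    simp only [List.foldl_cons]
    obtain ⟨heq2, inv2, hsub2⟩ := ih (pvBInner nbrSets u (order, edges) v).1
      (pvBInner nbrSets u (order, edges) v).2 inv1 (hsub1 u hu)
      (fun x hx => hnb x (by simp [hx]))
    refine ⟨?_, inv2, fun x hx => hsub2 x (hsub1 x hx)⟩
    rw [heq]
    exact heq2

theorem pv_outer_sim (knnD nbrSets : PySem.Dict Int (List Int))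
    (hN : ∀ u v : Int, (nbrSets.getD v []).contains u = (knnD.getD v []).contains u)
    (ps : List (Int × List Int)) (order : List Int) (edges : PySem.Dict (Int × Int) Int)
    (inv : PvInv knnD order edges)
    (hps : ∀ p ∈ ps, knnD.getD p.1 [] = p.2) :
    ps.foldl (fun g p => p.2.foldl (pvAInner knnD p.1) (g.setdefault p.1 PySem.Dict.empty))
        (pvExpand order edges)
      = pvExpand
          (ps.foldl (fun st p => p.2.foldl (pvBInner nbrSets p.1) (PySem.Set.add st.1 p.1, st.2)) (order, edges)).1
          (ps.foldl (fun st p => p.2.foldl (pvBInner nbrSets p.1) (PySem.Set.add st.1 p.1, st.2)) (order, edges)).2 := by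
  induction ps generalizing order edges with
  | nil => rfl
  | cons p ps ih =>
    obtain ⟨hsd, inv1⟩ := pvExpand_setdefault knnD order edges inv p.1
    simp only [List.foldl_cons]
    rw [hsd]
    have hu1 : p.1 ∈ PySem.Set.add order p.1 := (PySem.Set.mem_add _ _ _).mpr (Or.inr rfl)
    obtain ⟨heq, inv2, _⟩ := pv_inner_sim knnD nbrSets hN p.1 p.2 _ _ inv1 hu1
      (by
        intro x hx
        rw [hps p (by simp)]
        simpa using hx)
    rw [heq]
    exact ih _ _ inv2 (fun q hq => hps q (by simp [hq]))

theorem pv_nbrSets_contains (knnD : PySem.Dict Int (List Int)) (hnd : knnD.keys.Nodup) :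
    ∀ u v : Int,
      (((knnD.items.foldl (fun d p => d.insert p.1 (PySem.Set.ofList p.2))
          PySem.Dict.empty).getD v []).contains u)
        = (knnD.getD v []).contains u := by
  have hitems : (knnD.items.foldl (fun d p => d.insert p.1 (PySem.Set.ofList p.2))
      PySem.Dict.empty).items
      = knnD.items.map (fun p => (p.1, PySem.Set.ofList p.2)) := by
    have h := PySem.Dict.items_foldl_insert_fresh knnD.items (fun p => p.1)
      (fun p => PySem.Set.ofList p.2) PySem.Dict.empty
      (fun a _ => PySem.Dict.contains_empty _) hnd
    simpa using h
  intro u v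
  simp only [PySem.Dict.getD, PySem.Dict.get?, hitems]
  rw [List.find?_map]
  have hco : ((fun p => p.1 == v) ∘ (fun p => ((p : Int × List Int).1, PySem.Set.ofList p.2)))
      = (fun p => p.1 == v) := rfl
  rw [hco]
  cases hfind : knnD.items.find? (fun p => p.1 == v) with
  | none => simp [hfind]
  | some p =>
    simp only [hfind, Option.map_some, Option.getD_some]
    by_cases hu : u ∈ p.2
    · have h1 : u ∈ PySem.Set.ofList p.2 := (PySem.Set.mem_ofList _ _).mpr hu
      simp [h1, hu]
    · have h1 : u ∉ PySem.Set.ofList p.2 := fun h => hu ((PySem.Set.mem_ofList _ _).mp h)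
      simp [h1, hu]

-- ===== VERDICT (by name: the statement is the Claim_ definition above) =====
theorem symmetrize_graph_spec : Claim_equal_symmetrize_graph := by
  intro knn _
  unfold Spec_symmetrize_graph
  simp only [symmetrize_graph, symmetrize_graph_alt]
  have hnd := PySem.Dict.nodup_keys_ofList (κ := Int) (ν := List Int) knn
  have inv0 : PvInv (PySem.Dict.ofList knn) [] PySem.Dict.empty := by
    refine ⟨List.nodup_nil, List.nodup_nil, ?_⟩
    intro e he
    simp only [show (PySem.Dict.empty : PySem.Dict (Int × Int) Int).items = [] from rfl] at he
    simp at he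
  have hps : ∀ p ∈ (PySem.Dict.ofList knn).items, (PySem.Dict.ofList knn).getD p.1 [] = p.2 := by
    intro p hp
    have hp' : (p.1, p.2) ∈ (PySem.Dict.ofList knn).items := by simpa using hp
    have hg := PySem.Dict.get?_of_mem_items _ hp' hnd
    simp [PySem.Dict.getD, hg]
  have h := pv_outer_sim (PySem.Dict.ofList knn) _
    (pv_nbrSets_contains (PySem.Dict.ofList knn) hnd)
    (PySem.Dict.ofList knn).items [] PySem.Dict.empty inv0 hps
  have e0 : (PySem.Dict.empty : PySem.Dict Int (PySem.Dict Int Int)) = pvExpand [] PySem.Dict.empty := rfl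
  rw [e0, h]
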